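-- pv_equiv track=rewrite | github.com/SDM-TIB/RML-Planner | planner/functions.py | neighborhood_table
-- ===== SOURCE A (Python) =====
-- def neighborhood_table(partitions):
--     neighborhood = {}
--     for node in partitions:
--         neighborhood[node] = {}
--         for neighbor in partitions:
--             if node != neighbor:
--                 neighborhood[node][neighbor] = len(partitions[node].keys() & partitions[neighbor].keys())
--     return neighborhood
-- ===== SOURCE B (Python) =====
-- def neighborhood_table(partitions):
--     nodes = list(partitions)
--     # inverted index: key -> list of nodes whose partition contains it
--     index = {}
--     for node in nodes:
--         for key in partitions[node]:
--             index.setdefault(key, []).append(node)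
--     result = {}
--     for node in nodes:
--         # co-occurrence counts for this node via the inverted index
--         counts = {}
--         for key in partitions[node]:
--             for other in index[key]:
--                 counts[other] = counts.get(other, 0) + 1
--         result[node] = {nb: counts.get(nb, 0) for nb in nodes if nb != node}
--     return result
-- ===== Notes on version B (the rewrite author's own statement) =====
-- stated objective: faster
-- what changed: Replaces the per-pair key-set intersection with an inverted key->nodes index and per-node co-occurrence counters, so shared keys are counted once per co-occurrence instead of intersecting two key sets for every ordered pair.
import Mathlib
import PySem

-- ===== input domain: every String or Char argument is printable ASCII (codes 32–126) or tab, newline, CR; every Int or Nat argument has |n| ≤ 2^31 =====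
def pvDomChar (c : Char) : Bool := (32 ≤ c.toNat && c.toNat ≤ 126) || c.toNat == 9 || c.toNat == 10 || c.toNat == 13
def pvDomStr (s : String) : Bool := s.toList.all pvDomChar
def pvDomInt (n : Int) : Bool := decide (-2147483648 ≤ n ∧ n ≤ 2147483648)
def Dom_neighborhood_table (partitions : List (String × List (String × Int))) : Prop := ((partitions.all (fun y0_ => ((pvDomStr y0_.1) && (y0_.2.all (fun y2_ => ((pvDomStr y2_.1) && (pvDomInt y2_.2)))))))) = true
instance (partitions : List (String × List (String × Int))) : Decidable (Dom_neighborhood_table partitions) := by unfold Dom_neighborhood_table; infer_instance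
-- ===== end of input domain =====

-- B replaces A's per-pair key-set intersections by an inverted key→nodes index with
-- per-node co-occurrence counters (objective: faster).

-- shared representation helper: the dict-of-dicts parameter as a PySem.Dict of PySem.Dicts
def pvToDict (partitions : List (String × List (String × Int))) :
    PySem.Dict String (PySem.Dict String Int) :=
  PySem.Dict.mk (partitions.map (fun p => (p.1, PySem.Dict.mk p.2)))

-- ===== PORT A =====
def neighborhood_table (partitions : List (String × List (String × Int))) :
    List (String × List (String × Int)) :=
  let P := pvToDict partitions
  -- neighborhood = {}; for node in partitions: neighborhood[node] = {}; for neighbor ...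
  let nb : PySem.Dict String (PySem.Dict String Int) :=
    P.keys.foldl
      (fun nb node =>
        P.keys.foldl
          (fun nb neighbor =>
            if node ≠ neighbor then
              -- neighborhood[node][neighbor] = len(partitions[node].keys() & partitions[neighbor].keys())
              nb.modify node PySem.Dict.empty
                (fun inner =>
                  inner.insert neighbor
                    (PySem.Set.len
                      (PySem.Set.inter
                        (PySem.Set.ofList (P.getD node PySem.Dict.empty).keys)
                        (P.getD neighbor PySem.Dict.empty).keys)))
            else nb)
          (nb.insert node PySem.Dict.empty))
      PySem.Dict.empty
  nb.items.map (fun p => (p.1, p.2.items))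

-- ===== PORT B =====
def neighborhood_table_alt (partitions : List (String × List (String × Int))) :
    List (String × List (String × Int)) :=
  let P := pvToDict partitions
  let nodes := P.keys
  -- inverted index: key -> list of nodes whose partition contains it
  let index : PySem.Dict String (List String) :=
    nodes.foldl
      (fun idx node =>
        (P.getD node PySem.Dict.empty).keys.foldl
          (fun idx key => idx.modify key [] (fun l => l ++ [node])) idx)
      PySem.Dict.empty
  nodes.map (fun node =>
    -- co-occurrence counts for this node via the inverted index
    let counts : PySem.Dict String Int :=
      (P.getD node PySem.Dict.empty).keys.foldl
        (fun c key =>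
          (index.getD key []).foldl (fun c other => c.modify other 0 (· + 1)) c)
        PySem.Dict.empty
    (node, (nodes.filter (fun nb => decide (nb ≠ node))).map
             (fun nb => (nb, counts.getD nb 0))))

-- ===== PRECONDITION & SPEC =====
-- Pre_ excludes association lists with a duplicate outer key or a duplicate key inside a
-- partition: such lists do not arise from Python dicts (the parameter is a dict of dicts),
-- and on them A's first-match lookup semantics is accidental.
def Pre_neighborhood_table (partitions : List (String × List (String × Int))) : Prop :=
  (partitions.map Prod.fst).Nodup ∧ ∀ p ∈ partitions, (p.2.map Prod.fst).Nodup
instance (partitions : List (String × List (String × Int))) : Decidable (Pre_neighborhood_table partitions) := by unfold Pre_neighborhood_table; infer_instance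

def pvWitness_neighborhood_table : (List (String × List (String × Int))) :=
  [("a", [("k", 1), ("m", 2)]), ("b", [("k", 3)])]

def Spec_neighborhood_table (partitions : List (String × List (String × Int))) (out : List (String × List (String × Int))) : Prop := out = neighborhood_table_alt partitions
instance (partitions : List (String × List (String × Int))) (out : List (String × List (String × Int))) : Decidable (Spec_neighborhood_table partitions out) := by unfold Spec_neighborhood_table; infer_instance

-- ===== CLAIM (what is proved, stated in full; the proofs are below) =====
def Claim_equal_neighborhood_table : Prop := ∀ (partitions : List (String × List (String × Int))), Dom_neighborhood_table partitions → Pre_neighborhood_table partitions → Spec_neighborhood_table partitions (neighborhood_table partitions)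

-- ===== LEMMAS AND PROOFS =====

-- the common value: per node, keys of that node's partition
def pvKv (P : PySem.Dict String (PySem.Dict String Int)) (node : String) : List String :=
  (P.getD node PySem.Dict.empty).keys

-- the common form both ports are reduced to
def pvSpecTable (partitions : List (String × List (String × Int))) :
    List (String × List (String × Int)) :=
  let P := pvToDict partitions
  P.keys.map (fun node =>
    (node, (P.keys.filter (fun nb => decide (nb ≠ node))).map
             (fun nb => (nb, ((pvKv P node).countP (fun k => (pvKv P nb).contains k) : Int)))))

-- generic: a guarded fold is a fold over the filtered list
theorem pv_foldl_ite {α β : Type} (p : β → Prop) [DecidablePred p] (f : α → β → α)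
    (l : List β) (a : α) :
    l.foldl (fun a x => if p x then f a x else a) a
      = (l.filter (fun x => decide (p x))).foldl f a := by
  induction l generalizing a with
  | nil => rfl
  | cons x t ih =>
      by_cases hx : p x <;> simp [hx, ih]

theorem pv_insert_insert_same {κ ν : Type} [BEq κ] [LawfulBEq κ]
    (d : PySem.Dict κ ν) (k : κ) (v w : ν) :
    (d.insert k v).insert k w = d.insert k w := by
  apply PySem.Dict.ext
  by_cases hc : d.contains k = true
  · rw [PySem.Dict.items_insert_of_contains _ _ (by simp),
      PySem.Dict.items_insert_of_contains _ _ hc,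
      PySem.Dict.items_insert_of_contains _ _ hc, List.map_map]
    apply List.map_congr_left
    intro p _
    by_cases hp : p.1 == k <;> simp [hp]
  · have hnk : ∀ p ∈ d.items, (p.1 == k) = false := by
      intro p hp
      have hmem : p.1 ∈ d.keys := by
        simp only [PySem.Dict.keys]; exact List.mem_map_of_mem hp
      have : p.1 ≠ k := by
        intro h; exact hc ((PySem.Dict.contains_iff_mem_keys d k).mpr (h ▸ hmem))
      simpa using this
    rw [PySem.Dict.items_insert_of_contains _ _ (by simp),
      PySem.Dict.items_insert_of_not_contains _ _ (by simpa using hc),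
      PySem.Dict.items_insert_of_not_contains _ _ (by simpa using hc),
      List.map_append]
    congr 1
    · conv_rhs => rw [← List.map_id d.items]
      apply List.map_congr_left
      intro p hp
      simp [hnk p hp]
    · simp

-- a run of modifications at one key, starting from a dict where it was just inserted
theorem pv_foldl_modify_insert {κ ν : Type} [BEq κ] [LawfulBEq κ]
    (l : List κ) (k : κ) (d : PySem.Dict κ (PySem.Dict κ ν)) (v : κ → PySem.Dict κ ν → PySem.Dict κ ν)
    (inner0 : PySem.Dict κ ν) :
    l.foldl (fun nb x => nb.modify k PySem.Dict.empty (v x)) (d.insert k inner0)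
      = d.insert k (l.foldl (fun inner x => v x inner) inner0) := by
  induction l generalizing inner0 with
  | nil => rfl
  | cons x t ih =>
      simp only [List.foldl_cons, PySem.Dict.modify, PySem.Dict.getD_insert_self,
        pv_insert_insert_same]
      exact ih _

-- facts from Pre_: distinct nodes, duplicate-free key lists
theorem pv_nodes_nodup (partitions : List (String × List (String × Int)))
    (hpre : Pre_neighborhood_table partitions) : (pvToDict partitions).keys.Nodup := by
  have : (pvToDict partitions).keys = partitions.map Prod.fst := by
    simp [pvToDict, PySem.Dict.keys_mk, List.map_map, Function.comp]
  rw [this]; exact hpre.1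

theorem pv_kv_nodup (partitions : List (String × List (String × Int)))
    (hpre : Pre_neighborhood_table partitions) :
    ∀ node ∈ (pvToDict partitions).keys, (pvKv (pvToDict partitions) node).Nodup := by
  intro node hmem
  simp only [pvToDict, PySem.Dict.keys_mk, List.map_map, List.mem_map] at hmem
  obtain ⟨q, hq, rfl⟩ := hmem
  have hitem : (q.1, PySem.Dict.mk q.2) ∈ (pvToDict partitions).items := by
    simp only [pvToDict]
    exact List.mem_map_of_mem hq
  have hgd := PySem.Dict.getD_of_mem_items _ hitem (pv_nodes_nodup partitions hpre) PySem.Dict.empty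
  unfold pvKv
  simp only [Function.comp_apply]
  rw [hgd, PySem.Dict.keys_mk]
  exact hpre.2 q hq

-- the whole of A's nested fold, for an arbitrary duplicate-free key list and value function
theorem pv_a_shape (keys : List String) (val : String → String → Int) (hnd : keys.Nodup) :
    (keys.foldl
        (fun nb node =>
          keys.foldl
            (fun nb neighbor =>
              if node ≠ neighbor then
                nb.modify node PySem.Dict.empty
                  (fun inner => inner.insert neighbor (val node neighbor))
              else nb)
            (nb.insert node PySem.Dict.empty))
        PySem.Dict.empty).items.map (fun p => (p.1, p.2.items))
      = keys.map (fun node =>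
          (node, (keys.filter (fun x => decide (node ≠ x))).map (fun nb => (nb, val node nb)))) := by
  have hbody : (fun (nb : PySem.Dict String (PySem.Dict String Int)) (node : String) =>
      keys.foldl
        (fun nb neighbor =>
          if node ≠ neighbor then
            nb.modify node PySem.Dict.empty
              (fun inner => inner.insert neighbor (val node neighbor))
          else nb)
        (nb.insert node PySem.Dict.empty))
      = (fun nb node => nb.insert node
          ((keys.filter (fun x => decide (node ≠ x))).foldl
            (fun inner x => inner.insert x (val node x)) PySem.Dict.empty)) := by
    funext nb node
    rw [pv_foldl_ite (fun neighbor => node ≠ neighbor)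
        (fun (nb : PySem.Dict String (PySem.Dict String Int)) neighbor =>
          PySem.Dict.modify nb node PySem.Dict.empty
            (fun inner => inner.insert neighbor (val node neighbor)))]
    exact pv_foldl_modify_insert _ _ _ _ _
  rw [hbody,
    PySem.Dict.items_foldl_insert_fresh keys (fun a => a) _ PySem.Dict.empty
      (by intro a _; simp) (by simpa using hnd)]
  simp only [show (PySem.Dict.empty : PySem.Dict String (PySem.Dict String Int)).items = []
      from rfl, List.nil_append, List.map_map]
  apply List.map_congr_left
  intro node _
  simp only [Function.comp_apply]
  rw [PySem.Dict.items_foldl_insert_fresh _ (fun a => a) _ PySem.Dict.empty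
      (by intro a _; simp) (by simpa using hnd.filter _)]
  simp [PySem.Dict.empty]

theorem pv_table_a (partitions : List (String × List (String × Int)))
    (hpre : Pre_neighborhood_table partitions) :
    neighborhood_table partitions = pvSpecTable partitions := by
  have hnodes := pv_nodes_nodup partitions hpre
  have hkv := pv_kv_nodup partitions hpre
  unfold neighborhood_table pvSpecTable
  rw [pv_a_shape (pvToDict partitions).keys
      (fun node neighbor =>
        PySem.Set.len
          (PySem.Set.inter
            (PySem.Set.ofList ((pvToDict partitions).getD node PySem.Dict.empty).keys)
            ((pvToDict partitions).getD neighbor PySem.Dict.empty).keys)) hnodes]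
  apply List.map_congr_left
  intro node hnode
  have hfil : List.filter (fun x => decide (node ≠ x)) (pvToDict partitions).keys
      = List.filter (fun nb => decide (nb ≠ node)) (pvToDict partitions).keys := by
    apply List.filter_congr; intro x _; simp [ne_comm]
  rw [hfil]
  refine congrArg _ ?_
  apply List.map_congr_left
  intro nb hnb
  refine congrArg _ ?_
  rw [show PySem.Set.ofList ((pvToDict partitions).getD node PySem.Dict.empty).keys
      = ((pvToDict partitions).getD node PySem.Dict.empty).keys
      from PySem.Set.ofList_eq_self_of_nodup _ (hkv node hnode)]
  simp [pvKv, PySem.Set.len, PySem.Set.inter, List.countP_eq_length_filter]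

-- one pass of B's index-building loop, seen through getD
theorem pv_inner_getD (ks : List String) (hnd : ks.Nodup) (x c : String)
    (idx : PySem.Dict String (List String)) :
    (ks.foldl (fun idx key => idx.modify key [] (fun ll => ll ++ [x])) idx).getD c []
      = idx.getD c [] ++ (if ks.contains c then [x] else []) := by
  have h1 : ks.foldl (fun idx key => idx.modify key [] (fun ll => ll ++ [x])) idx
      = (ks.map (fun k => (k, x))).foldl
          (fun d p => d.modify p.1 [] (fun ll => ll ++ [p.2])) idx := by
    rw [List.foldl_map]
  rw [h1, PySem.Dict.getD_foldl_modify_append, List.filter_map, List.map_map]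
  congr 1
  have h2 : (ks.filter (fun k => k == c)) = List.replicate (ks.count c) c :=
    List.filter_beq c
  by_cases hm : c ∈ ks
  · rw [show (fun p => p.1 == c) ∘ (fun k => ((k, x) : String × String)) = (fun k => k == c)
        from rfl, h2, List.count_eq_one_of_mem hnd hm]
    simp [hm]
  · rw [show (fun p => p.1 == c) ∘ (fun k => ((k, x) : String × String)) = (fun k => k == c)
        from rfl, h2, List.count_eq_zero_of_not_mem hm]
    simp [hm]

-- B's full index, seen through getD: the nodes whose key list carries c, in order
theorem pv_index_getD (g : String → List String) (l : List String) (c : String)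
    (idx : PySem.Dict String (List String)) (hg : ∀ x ∈ l, (g x).Nodup) :
    (l.foldl (fun idx node =>
        (g node).foldl (fun idx key => idx.modify key [] (fun ll => ll ++ [node])) idx)
      idx).getD c []
      = idx.getD c [] ++ l.filter (fun x => (g x).contains c) := by
  induction l generalizing idx with
  | nil => simp
  | cons x t ih =>
      rw [List.foldl_cons, ih _ (fun y hy => hg y (List.mem_cons_of_mem x hy)),
        pv_inner_getD (g x) (hg x List.mem_cons_self) x c idx, List.filter_cons]
      by_cases hm : c ∈ g x <;> simp [hm]

-- B's co-occurrence counter, seen through getD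
theorem pv_counts_getD (idxget : String → List String) (l : List String)
    (c0 : PySem.Dict String Int) (nb : String) :
    (l.foldl (fun c key =>
        (idxget key).foldl (fun c o => c.modify o 0 (· + 1)) c) c0).getD nb 0
      = c0.getD nb 0 + (l.map (fun key => ((idxget key).count nb : Int))).sum := by
  induction l generalizing c0 with
  | nil => simp
  | cons x t ih =>
      rw [List.foldl_cons, ih, PySem.Dict.getD_foldl_modify_add_one]
      simp [add_assoc]

theorem pv_table_b (partitions : List (String × List (String × Int)))
    (hpre : Pre_neighborhood_table partitions) :
    neighborhood_table_alt partitions = pvSpecTable partitions := by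
  have hnodes := pv_nodes_nodup partitions hpre
  have hkv := pv_kv_nodup partitions hpre
  unfold neighborhood_table_alt pvSpecTable
  apply List.map_congr_left
  intro node hnode
  refine congrArg _ ?_
  apply List.map_congr_left
  intro nb hnb
  have hnbmem : nb ∈ (pvToDict partitions).keys := (List.mem_filter.mp hnb).1
  refine congrArg _ ?_
  rw [pv_counts_getD, show (PySem.Dict.empty : PySem.Dict String Int).getD nb 0 = 0 from rfl,
    zero_add]
  have hidx : ∀ key : String,
      ((pvToDict partitions).keys.foldl (fun idx node =>
          ((pvToDict partitions).getD node PySem.Dict.empty).keys.foldl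
            (fun idx key => idx.modify key [] (fun ll => ll ++ [node])) idx)
        PySem.Dict.empty).getD key []
      = (pvToDict partitions).keys.filter (fun x => (pvKv (pvToDict partitions) x).contains key) := by
    intro key
    exact pv_index_getD (fun x => pvKv (pvToDict partitions) x) (pvToDict partitions).keys key
      PySem.Dict.empty hkv
  simp only [hidx]
  have hcount : ∀ key : String,
      ((pvToDict partitions).keys.filter
          (fun x => (pvKv (pvToDict partitions) x).contains key)).count nb
        = if (pvKv (pvToDict partitions) nb).contains key then 1 else 0 := by
    intro key
    by_cases hkey : key ∈ pvKv (pvToDict partitions) nb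
    · rw [List.count_filter (by simpa using hkey)]
      simp [List.count_eq_one_of_mem hnodes hnbmem, hkey]
    · rw [List.count_eq_zero_of_not_mem
        (fun hmemf => hkey (by simpa using (List.mem_filter.mp hmemf).2))]
      simp [hkey]
  simp only [hcount]
  have hcast : (fun key => (((if (pvKv (pvToDict partitions) nb).contains key = true then 1 else 0 : Nat) : Int)))
      = (fun key => if (pvKv (pvToDict partitions) nb).contains key = true then (1 : Int) else 0) := by
    funext key; split <;> simp
  rw [hcast, PySem.List.sum_map_ite_one_zero (fun key => (pvKv (pvToDict partitions) nb).contains key)]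
  simp [pvKv]

-- ===== VERDICT (by name: the statement is the Claim_ definition above) =====
theorem neighborhood_table_spec : Claim_equal_neighborhood_table := by
  intro partitions _ hpre
  unfold Spec_neighborhood_table
  rw [pv_table_a partitions hpre, pv_table_b partitions hpre]
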